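-- pv_equiv track=rewrite | github.com/cerutidavide/photomanager | com/ceruti/photomanager/photomanager.py | retrieveUniqFileHash
-- ===== SOURCE A (Python) =====
-- def retrieveUniqFileHash(hashtable , preferredPathSubstr):
--     hashresult = {}
--     strfield = ''
--     for key in hashtable.keys ():
--         if len (hashtable[key]) == 1:
--             hashresult[key] = hashtable[key]
--         else:
--             for strfield in hashtable[key]:
--                 if strfield.find (preferredPathSubstr) > -1:
--                     hashresult[key] = strfield.split ()
--                 else:
--                     if key in hashresult:
--                         pass
--                     else:
--                         hashresult[key] = strfield.split ()
--                     pass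
--             pass
--     return hashresult
--     pass
-- ===== SOURCE B (Python) =====
-- def retrieveUniqFileHash(hashtable, preferredPathSubstr):
--     result = {}
--     for key, paths in hashtable.items():
--         if not paths:
--             continue
--         if len(paths) == 1:
--             result[key] = paths
--         else:
--             chosen = next((p for p in reversed(paths) if preferredPathSubstr in p),
--                           paths[0])
--             result[key] = chosen.split()
--     return result
-- ===== Notes on version B (the rewrite author's own statement) =====
-- stated objective: simpler
-- what changed: A builds the result dict statefully, overwriting on every later preferred match and testing 'key in hashresult' to protect earlier entries; B dispatches per key on three explicit cases (empty list: skip; singleton: keep raw list; otherwise: pick the last string containing the substring via a reversed-scan next() with the first string as default) and never consults the result being built.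
import Mathlib
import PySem

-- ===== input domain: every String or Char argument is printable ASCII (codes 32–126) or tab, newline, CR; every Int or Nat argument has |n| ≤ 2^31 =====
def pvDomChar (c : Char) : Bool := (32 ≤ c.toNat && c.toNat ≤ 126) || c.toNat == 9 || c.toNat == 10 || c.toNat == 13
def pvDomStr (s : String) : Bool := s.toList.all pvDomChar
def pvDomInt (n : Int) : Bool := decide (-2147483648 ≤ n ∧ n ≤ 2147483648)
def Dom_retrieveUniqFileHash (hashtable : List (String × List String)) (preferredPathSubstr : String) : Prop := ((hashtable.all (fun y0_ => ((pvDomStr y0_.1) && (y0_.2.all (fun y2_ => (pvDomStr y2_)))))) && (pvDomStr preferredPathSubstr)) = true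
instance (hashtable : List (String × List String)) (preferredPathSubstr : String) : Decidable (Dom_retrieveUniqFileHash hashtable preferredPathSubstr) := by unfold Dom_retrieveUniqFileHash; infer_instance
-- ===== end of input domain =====

-- B replaces A's overwrite-and-membership-test state machine by an explicit per-key
-- three-case dispatch with a reversed-scan last-match search (objective: simpler).

-- ===== PORT A =====
def retrieveUniqFileHash (hashtable : List (String × List String)) (preferredPathSubstr : String) : List (String × List String) :=
  (hashtable.foldl (fun hashresult kv =>
      if kv.2.length == 1 then
        hashresult.insert kv.1 kv.2
      else
        kv.2.foldl (fun hashresult strfield =>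
          if PySem.Str.find strfield preferredPathSubstr > -1 then
            hashresult.insert kv.1 (PySem.Str.split₀ strfield)
          else
            if hashresult.contains kv.1 then hashresult
            else hashresult.insert kv.1 (PySem.Str.split₀ strfield)) hashresult)
    PySem.Dict.empty).items

-- ===== PORT B =====
-- next((p for p in reversed(paths) if preferredPathSubstr in p), paths[0])
def pickPreferred (preferredPathSubstr x : String) (xs : List String) : String :=
  (((x :: xs).reverse.find? (fun p => PySem.Str.isIn preferredPathSubstr p))).getD x

def retrieveUniqFileHash_alt (hashtable : List (String × List String)) (preferredPathSubstr : String) : List (String × List String) :=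
  hashtable.flatMap (fun kv =>
    match kv.2 with
    | [] => []
    | [_] => [(kv.1, kv.2)]
    | x :: xs => [(kv.1, PySem.Str.split₀ (pickPreferred preferredPathSubstr x xs))])

-- ===== PRECONDITION & SPEC =====
-- Pre_ excludes association lists with duplicate keys: they do not represent any Python
-- dict (a dict's keys are unique), and which entry survives is an artefact of the list
-- encoding, not of A.
def Pre_retrieveUniqFileHash (hashtable : List (String × List String)) (preferredPathSubstr : String) : Prop :=
  (hashtable.map Prod.fst).Nodup

instance (hashtable : List (String × List String)) (preferredPathSubstr : String) : Decidable (Pre_retrieveUniqFileHash hashtable preferredPathSubstr) := by unfold Pre_retrieveUniqFileHash; infer_instance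

def pvWitness_retrieveUniqFileHash : (List (String × List String)) × String :=
  ([("h1", ["a b"]), ("h2", ["x/a y", "x/pref/b c"])], "pref")

def Spec_retrieveUniqFileHash (hashtable : List (String × List String)) (preferredPathSubstr : String) (out : List (String × List String)) : Prop := out = retrieveUniqFileHash_alt hashtable preferredPathSubstr
instance (hashtable : List (String × List String)) (preferredPathSubstr : String) (out : List (String × List String)) : Decidable (Spec_retrieveUniqFileHash hashtable preferredPathSubstr out) := by unfold Spec_retrieveUniqFileHash; infer_instance

-- ===== CLAIM =====
def Claim_equal_retrieveUniqFileHash : Prop := ∀ (hashtable : List (String × List String)) (preferredPathSubstr : String), Dom_retrieveUniqFileHash hashtable preferredPathSubstr → Pre_retrieveUniqFileHash hashtable preferredPathSubstr → Spec_retrieveUniqFileHash hashtable preferredPathSubstr (retrieveUniqFileHash hashtable preferredPathSubstr)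

-- ===== LEMMAS AND PROOFS =====

-- A's inner loop body, named for the proofs (definitionally the lambda in the port)
def innerStep (preferredPathSubstr key : String) (hashresult : PySem.Dict String (List String)) (strfield : String) : PySem.Dict String (List String) :=
  if PySem.Str.find strfield preferredPathSubstr > -1 then
    hashresult.insert key (PySem.Str.split₀ strfield)
  else
    if hashresult.contains key then hashresult
    else hashresult.insert key (PySem.Str.split₀ strfield)

-- A's outer loop body
def outerStep (preferredPathSubstr : String) (hashresult : PySem.Dict String (List String)) (kv : String × List String) : PySem.Dict String (List String) :=
  if kv.2.length == 1 then
    hashresult.insert kv.1 kv.2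
  else
    kv.2.foldl (innerStep preferredPathSubstr kv.1) hashresult

theorem A_def (hashtable : List (String × List String)) (preferredPathSubstr : String) :
    retrieveUniqFileHash hashtable preferredPathSubstr
      = (hashtable.foldl (outerStep preferredPathSubstr) PySem.Dict.empty).items := rfl

-- once the key is present, the inner loop only overwrites it on a preferred match
theorem inner_insert (sub key : String) (d : PySem.Dict String (List String)) :
    ∀ (v : List String) (w : List String),
      v.foldl (innerStep sub key) (d.insert key w)
        = d.insert key (v.foldl (fun a s => if PySem.Str.find s sub > -1 then PySem.Str.split₀ s else a) w) := by
  intro v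
  induction v with
  | nil => intro w; simp [List.foldl]
  | cons s v ih =>
    intro w
    by_cases h : PySem.Str.find s sub > -1
    · simp only [List.foldl, innerStep, if_pos h, PySem.Dict.insert_insert_self]
      exact ih (PySem.Str.split₀ s)
    · simp only [List.foldl, innerStep, if_neg h, PySem.Dict.contains_insert_self, if_pos]
      exact ih w

-- a keep-last fold equals a find? on the reversed list
theorem foldl_last (P : String → Prop) [DecidablePred P] (f : String → List String) :
    ∀ (v : List String) (w : List String),
      v.foldl (fun a s => if P s then f s else a) w
        = ((v.reverse.find? (fun s => decide (P s))).map f).getD w := by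
  intro v
  induction v with
  | nil => intro w; rfl
  | cons s v ih =>
    intro w
    simp only [List.foldl, List.reverse_cons, List.find?_append]
    rw [ih]
    cases hv : v.reverse.find? (fun s => decide (P s)) with
    | some t => simp
    | none =>
      by_cases h : P s
      · simp [h]
      · simp [h]

theorem pred_eq (sub : String) :
    (fun p => PySem.Str.isIn sub p) = (fun s => decide (PySem.Str.find s sub > -1)) := by
  funext s
  by_cases h : sub.toList <:+: s.toList
  · have h1 := (PySem.Str.isIn_iff_infix sub s).mpr h
    have h2 := (PySem.Str.find_nonneg_iff s sub).mpr h
    rw [PySem.Str.find_eq] at h2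
    rw [h1, eq_comm, decide_eq_true_iff, PySem.Str.find_eq]
    omega
  · have h2 := (PySem.Str.find_eq_neg_one_iff s sub).mpr h
    have h1 : PySem.Str.isIn sub s = false := by
      cases hb : PySem.Str.isIn sub s
      · rfl
      · exact absurd ((PySem.Str.isIn_iff_infix sub s).mp hb) h
    rw [PySem.Str.find_eq] at h2
    rw [h1, eq_comm, decide_eq_false_iff_not, PySem.Str.find_eq]
    omega

-- the whole inner loop, started with the key absent, inserts the preferred pick
theorem inner_fresh (sub key : String) (d : PySem.Dict String (List String))
    (hk : d.contains key = false) (x : String) (xs : List String) :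
    (x :: xs).foldl (innerStep sub key) d
      = d.insert key (PySem.Str.split₀ (pickPreferred sub x xs)) := by
  have hfirst : innerStep sub key d x = d.insert key (PySem.Str.split₀ x) := by
    unfold innerStep
    by_cases h : PySem.Str.find x sub > -1
    · rw [if_pos h]
    · rw [if_neg h]
      simp [hk]
  have : (x :: xs).foldl (innerStep sub key) d
      = xs.foldl (innerStep sub key) (d.insert key (PySem.Str.split₀ x)) := by
    simp only [List.foldl, hfirst]
  rw [this, inner_insert,
    foldl_last (fun s => PySem.Str.find s sub > -1) PySem.Str.split₀ xs (PySem.Str.split₀ x)]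
  unfold pickPreferred
  rw [pred_eq sub]
  simp only [List.reverse_cons, List.find?_append]
  cases hv : xs.reverse.find? (fun s => decide (PySem.Str.find s sub > -1)) with
  | some t => simp
  | none =>
    by_cases h : PySem.Chars.find x.toList sub.toList > -1
    · simp [h]
    · simp [h]

-- the main invariant: the outer fold appends B's rows to the accumulated items
theorem main_inv (sub : String) :
    ∀ (l : List (String × List String)) (d : PySem.Dict String (List String)),
      (l.map Prod.fst).Nodup → (∀ k ∈ l.map Prod.fst, d.contains k = false) →
      (l.foldl (outerStep sub) d).items = d.items ++ retrieveUniqFileHash_alt l sub := by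
  intro l
  induction l with
  | nil => intro d _ _; simp [retrieveUniqFileHash_alt]
  | cons kv l ih =>
    intro d hnd hfresh
    obtain ⟨k, v⟩ := kv
    have hk : d.contains k = false := hfresh k (by simp)
    have hknl : k ∉ l.map Prod.fst := by
      simp only [List.map_cons, List.nodup_cons] at hnd; exact hnd.1
    have hndl : (l.map Prod.fst).Nodup := by
      simp only [List.map_cons, List.nodup_cons] at hnd; exact hnd.2
    have step_items : ∀ (w : List String),
        ((d.insert k w).items = d.items ++ [(k, w)]) :=
      fun w => PySem.Dict.items_insert_of_not_contains d w hk
    have step_fresh : ∀ (w : List String) (k' : String), k' ∈ l.map Prod.fst →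
        (d.insert k w).contains k' = false := by
      intro w k' hk'
      have hne : k' ≠ k := fun h => hknl (h ▸ hk')
      rw [PySem.Dict.contains_insert]
      simp [hne, hfresh k' (by simp [hk'])]
    match v with
    | [] =>
      have : outerStep sub d (k, ([] : List String)) = d := by
        simp [outerStep, List.foldl]
      simp only [List.foldl, this]
      rw [ih d hndl (fun k' hk' => hfresh k' (by simp [hk']))]
      simp [retrieveUniqFileHash_alt]
    | [x] =>
      have : outerStep sub d (k, [x]) = d.insert k [x] := by
        simp [outerStep]
      simp only [List.foldl, this]
      rw [ih (d.insert k [x]) hndl (step_fresh [x]), step_items [x]]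
      simp [retrieveUniqFileHash_alt]
    | x :: y :: ys =>
      have hlen : ((x :: y :: ys).length == 1) = false := by simp
      have : outerStep sub d (k, x :: y :: ys)
          = d.insert k (PySem.Str.split₀ (pickPreferred sub x (y :: ys))) := by
        rw [outerStep, hlen]
        simp only [Bool.false_eq_true, if_false]
        exact inner_fresh sub k d hk x (y :: ys)
      simp only [List.foldl, this]
      rw [ih _ hndl (step_fresh _), step_items _]
      simp [retrieveUniqFileHash_alt]

-- ===== VERDICT =====
theorem retrieveUniqFileHash_spec : Claim_equal_retrieveUniqFileHash := by
  intro hashtable preferredPathSubstr _ hpre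
  unfold Spec_retrieveUniqFileHash
  rw [A_def, main_inv preferredPathSubstr hashtable PySem.Dict.empty hpre
    (fun k _ => PySem.Dict.contains_empty k)]
  simp [PySem.Dict.empty]
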